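-- pv_equiv track=rewrite | github.com/matematicodosdados/matematicodosdados | Computer Programming DCC001 - Answers/Listas/problema6.py | tamanho_maior_string
-- ===== SOURCE A (Python) =====
-- def tamanho_maior_string(lista):
--     lista_1 = []
--     if lista == []:
--         return 0
--     else:
--         for i in lista:
--             lista_1 += [len(i)]
--         lista_1.sort()
--         return max(lista_1)
-- ===== SOURCE B (Python) =====
-- def tamanho_maior_string(lista):
--     m = 0
--     for i in lista:
--         if len(i) > m:
--             m = len(i)
--     return m
-- ===== Notes on version B (the rewrite author's own statement) =====
-- stated objective: faster
-- what changed: A materializes a list of all lengths, sorts it and takes max; B maintains a single running-maximum scalar in one pass with no intermediate list and no sort.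
import Mathlib
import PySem

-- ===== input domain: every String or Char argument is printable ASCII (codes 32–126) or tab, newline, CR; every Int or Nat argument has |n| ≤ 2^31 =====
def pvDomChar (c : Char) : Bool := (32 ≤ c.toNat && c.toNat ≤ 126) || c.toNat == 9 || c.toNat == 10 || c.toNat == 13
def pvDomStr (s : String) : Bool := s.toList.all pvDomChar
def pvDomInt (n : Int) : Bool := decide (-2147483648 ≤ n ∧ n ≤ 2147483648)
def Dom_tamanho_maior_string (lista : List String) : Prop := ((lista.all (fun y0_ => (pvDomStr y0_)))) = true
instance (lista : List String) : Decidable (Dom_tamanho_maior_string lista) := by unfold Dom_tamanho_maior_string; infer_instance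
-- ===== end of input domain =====

-- ===== PORT A =====
-- B replaces A's length-list + sort + max with a single running-maximum scalar pass (simpler).
def tamanho_maior_string (lista : List String) : Int :=
  if lista = [] then 0
  else
    let lista_1 : List Int := lista.foldl (fun acc i => acc ++ [PySem.Str.len i]) []
    let lista_1 := PySem.List.sorted lista_1 (fun x => x) false
    -- max(lista_1): the list is provably nonempty here, so max? = some; getD 0 is never the default
    (PySem.List.max? lista_1 (fun y => y)).getD 0

-- ===== PORT B =====
def tamanho_maior_string_alt (lista : List String) : Int :=
  lista.foldl (fun m i => if PySem.Str.len i > m then PySem.Str.len i else m) 0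

-- ===== PRECONDITION & SPEC =====
def Spec_tamanho_maior_string (lista : List String) (out : Int) : Prop := out = tamanho_maior_string_alt lista
instance (lista : List String) (out : Int) : Decidable (Spec_tamanho_maior_string lista out) := by unfold Spec_tamanho_maior_string; infer_instance

-- ===== CLAIM (what is proved, stated in full; the proofs are below) =====
def Claim_equal_tamanho_maior_string : Prop := ∀ (lista : List String), Dom_tamanho_maior_string lista → Spec_tamanho_maior_string lista (tamanho_maior_string lista)

-- ===== LEMMAS AND PROOFS =====

-- B's branch-update is exactly the binary max
theorem alt_eq_foldl_max (lista : List String) :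
    tamanho_maior_string_alt lista
      = (lista.map PySem.Str.len).foldl max 0 := by
  unfold tamanho_maior_string_alt
  have hf : (fun (m : Int) (i : String) => if PySem.Str.len i > m then PySem.Str.len i else m)
      = fun m i => max m (PySem.Str.len i) := by
    funext m i
    by_cases h : PySem.Str.len i > m <;> simp [max_def] <;> omega
  rw [hf, List.foldl_map]

-- A's append loop builds the map of lengths
theorem loop_eq_map (lista : List String) (acc : List Int) :
    lista.foldl (fun acc i => acc ++ [PySem.Str.len i]) acc
      = acc ++ lista.map PySem.Str.len := by
  induction lista generalizing acc with
  | nil => simp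
  | cons x t ih => rw [List.foldl_cons, ih]; simp

theorem foldl_max_perm {l₁ l₂ : List Int} (p : l₁.Perm l₂) (a : Int) :
    l₁.foldl max a = l₂.foldl max a :=
  p.foldl_eq a

theorem len_nonneg (s : String) : 0 ≤ PySem.Str.len s := by
  simp [PySem.Str.len_eq]

theorem tamanho_spec_aux (lista : List String) :
    tamanho_maior_string lista = tamanho_maior_string_alt lista := by
  unfold tamanho_maior_string
  rw [alt_eq_foldl_max]
  by_cases h : lista = []
  · simp [h]
  · simp only [h, if_false, loop_eq_map, List.nil_append]
    set L := lista.map PySem.Str.len with hL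
    have hLne : L ≠ [] := by simpa [hL] using h
    -- sorted L is a permutation of L, nonempty
    have hperm : (PySem.List.sorted L (fun x => x) false).Perm L :=
      PySem.List.sorted_perm L (fun x => x) false
    rcases hs : PySem.List.sorted L (fun x => x) false with _ | ⟨x, t⟩
    · rw [hs] at hperm; exact absurd hperm.symm.eq_nil hLne
    · rw [PySem.List.max?_id_cons, Option.getD_some]
      have hx : x ∈ L := hperm.mem_iff.mp (by rw [hs]; exact List.mem_cons_self)
      have hx0 : 0 ≤ x := by
        rcases List.mem_map.mp (by simpa [hL] using hx) with ⟨s, _, rfl⟩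
        exact len_nonneg s
      have : L.foldl max 0 = (x :: t).foldl max 0 :=
        foldl_max_perm (hs ▸ hperm).symm 0
      rw [this, List.foldl_cons, max_eq_right hx0]

-- ===== VERDICT (by name: the statement is the Claim_ definition above) =====
theorem tamanho_maior_string_spec : Claim_equal_tamanho_maior_string := by
  intro lista _
  unfold Spec_tamanho_maior_string
  exact tamanho_spec_aux lista
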